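-- pv_equiv track=rewrite | github.com/AkashDeveloper8758/dsa_implementations | DSA_part_1/string/string.py | leftMostRepeatingChar
-- ===== SOURCE A (Python) =====
-- import math
--
-- def leftMostRepeatingChar(string):
--     n = len(string)
--     charLen = 256
--     charArr = [-1 for _ in range(charLen)]
--     res = math.inf
--     for i in range(n):
--         fi = charArr[ord(string[i])]
--         if fi == -1:
--             # put the index if it is -1
--             charArr[ord(string[i])] = i
--         else:
--             # check for the min index if second element founc
--             res = min(res,fi)
--     return -1 if res == math.inf else res
-- ===== SOURCE B (Python) =====
-- def leftMostRepeatingChar(string):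
--     counts = {}
--     for ch in string:
--         counts[ch] = counts.get(ch, 0) + 1
--     for i, ch in enumerate(string):
--         if counts[ch] > 1:
--             return i
--     return -1
-- ===== Notes on version B (the rewrite author's own statement) =====
-- stated objective: idiomatic
-- what changed: Replaces the single-pass 256-slot first-seen-index array with a running minimum by a two-pass count-then-find: build a frequency dict of all characters, then return the first index whose character has count > 1.
import Mathlib
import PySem

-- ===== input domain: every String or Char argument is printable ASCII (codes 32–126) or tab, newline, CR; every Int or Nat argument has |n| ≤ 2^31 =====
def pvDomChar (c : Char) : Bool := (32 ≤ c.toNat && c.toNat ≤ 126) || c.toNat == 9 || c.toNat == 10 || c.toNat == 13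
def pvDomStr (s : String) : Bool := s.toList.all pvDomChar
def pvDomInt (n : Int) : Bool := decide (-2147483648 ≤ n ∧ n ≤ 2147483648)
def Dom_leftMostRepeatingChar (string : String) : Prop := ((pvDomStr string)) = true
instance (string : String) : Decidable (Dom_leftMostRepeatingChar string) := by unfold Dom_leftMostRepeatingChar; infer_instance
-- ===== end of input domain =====

-- B replaces A's one-pass 256-slot first-seen-index array with a running minimum by a
-- two-pass count-then-find (frequency dict, then first index whose char has count > 1); objective: idiomatic.

-- ===== PORT A =====
-- the loop `for i in range(n)` over charArr (256-slot list) and res (math.inf modelled as none)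
def pvGoA : List Char → Nat → List Int → Option Int → Int
  | [], _, _, res => res.getD (-1)
  | c :: rest, i, arr, res =>
      let fi := arr.getD c.toNat (-1)
      if fi = -1 then pvGoA rest (i + 1) (arr.set c.toNat (i : Int)) res
      else pvGoA rest (i + 1) arr (some (match res with | none => fi | some r => min r fi))

def leftMostRepeatingChar (string : String) : Int :=
  pvGoA string.toList 0 (List.replicate 256 (-1)) none

-- ===== PORT B =====
-- second loop of Source B: `for i, ch in enumerate(string): if counts[ch] > 1: return i`
def pvGoB : List Char → Nat → PySem.Dict Char Int → Int
  | [], _, _ => -1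
  | c :: rest, i, d => if 1 < d.getD c 0 then (i : Int) else pvGoB rest (i + 1) d

def leftMostRepeatingChar_alt (string : String) : Int :=
  let counts := string.toList.foldl (fun d c => d.insert c (d.getD c 0 + 1)) PySem.Dict.empty
  pvGoB string.toList 0 counts

-- ===== PRECONDITION & SPEC =====
def Spec_leftMostRepeatingChar (string : String) (out : Int) : Prop := out = leftMostRepeatingChar_alt string
instance (string : String) (out : Int) : Decidable (Spec_leftMostRepeatingChar string out) := by unfold Spec_leftMostRepeatingChar; infer_instance

-- ===== CLAIM (what is proved, stated in full; the proofs are below) =====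
def Claim_equal_leftMostRepeatingChar : Prop := ∀ (string : String), Dom_leftMostRepeatingChar string → Spec_leftMostRepeatingChar string (leftMostRepeatingChar string)

-- ===== LEMMAS AND PROOFS =====

-- proof-side: first index in the list whose character satisfies p
def pvFr (p : Char → Bool) : List Char → Option Nat
  | [] => none
  | c :: l => if p c then some 0 else (pvFr p l).map (· + 1)

def pvOmin (a b : Option Nat) : Option Nat :=
  match a, b with
  | none, b => b
  | some x, none => some x
  | some x, some y => some (min x y)

-- proof-side abstraction of A's loop body: state = (first-seen map, res, i)
def pvStep (st : (Char → Option Nat) × Option Int × Nat) (c : Char) :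
    (Char → Option Nat) × Option Int × Nat :=
  match st.1 c with
  | none => (fun x => if x = c then some st.2.2 else st.1 x, st.2.1, st.2.2 + 1)
  | some j => (st.1, some (match st.2.1 with | none => ((j : Nat) : Int) | some r => min r ((j : Nat) : Int)), st.2.2 + 1)

theorem pvFr_congr {p q : Char → Bool} : ∀ {l : List Char}, (∀ x ∈ l, p x = q x) → pvFr p l = pvFr q l := by
  intro l h
  induction l with
  | nil => rfl
  | cons a l ih =>
    have ha := h a (by simp)
    simp only [pvFr, ha, ih (fun x hx => h x (by simp [hx]))]

theorem pvFr_append_singleton (p : Char → Bool) (l : List Char) (c : Char) :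
    pvFr p (l ++ [c]) = (match pvFr p l with
      | some k => some k
      | none => if p c then some l.length else none) := by
  induction l with
  | nil => simp [pvFr]
  | cons a l ih =>
    by_cases h : p a
    · simp [pvFr, h]
    · simp only [List.cons_append, pvFr, h, ih]
      cases hfr : pvFr p l with
      | none => by_cases hc : p c <;> simp [hc]
      | some k => simp

theorem pvFr_or (p q : Char → Bool) : ∀ (l : List Char),
    pvFr (fun x => p x || q x) l = pvOmin (pvFr p l) (pvFr q l) := by
  intro l
  induction l with
  | nil => rfl
  | cons a l ih =>
    by_cases hp : p a
    · simp only [pvFr, hp, Bool.true_or, if_true]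
      by_cases hq : q a <;> cases hfr : pvFr q l <;> simp [pvOmin, hq]
    · by_cases hq : q a
      · simp only [pvFr, hp, hq, Bool.false_or, if_true]
        cases pvFr p l <;> simp [pvOmin]
      · simp only [pvFr, hp, hq, Bool.false_or, ih]
        cases pvFr p l <;> cases pvFr q l <;> simp [pvOmin, Nat.add_min_add_right]

theorem pvFr_some_lt {p : Char → Bool} : ∀ {l : List Char} {k : Nat}, pvFr p l = some k → k < l.length := by
  intro l
  induction l with
  | nil => intro k h; simp [pvFr] at h
  | cons a l ih =>
    intro k h
    by_cases hp : p a
    · simp only [pvFr, hp, if_true] at h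
      cases h; simp
    · cases hfr : pvFr p l with
      | none => simp [pvFr, hp, hfr] at h
      | some m =>
        simp [pvFr, hp, hfr] at h
        have := ih hfr
        simp only [List.length_cons]; omega

theorem pvFr_eq_none_of_not_mem {c : Char} : ∀ {l : List Char}, c ∉ l → pvFr (fun x => x == c) l = none := by
  intro l h
  induction l with
  | nil => rfl
  | cons a l ih =>
    have : (a == c) = false := by simp; rintro rfl; exact h (by simp)
    simp [pvFr, this, ih (fun hm => h (by simp [hm]))]

-- A's concrete loop equals the fold of pvStep, under the array/map correspondence
theorem pvGoA_eq : ∀ (l : List Char) (arr : List Int) (f : Char → Option Nat) (res : Option Int) (i : Nat),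
    arr.length = 256 →
    (∀ c : Char, c.toNat < 256 → arr.getD c.toNat (-1) = (f c).elim (-1) (fun j => (j : Int))) →
    (∀ c ∈ l, c.toNat < 256) →
    pvGoA l i arr res = ((l.foldl pvStep (f, res, i)).2.1).getD (-1) := by
  intro l
  induction l with
  | nil => intro arr f res i _ _ _; simp [pvGoA]
  | cons c rest ih =>
    intro arr f res i hlen hcorr hdom
    have hc : c.toNat < 256 := hdom c (by simp)
    have hfi := hcorr c hc
    cases hfc : f c with
    | none =>
      rw [hfc] at hfi
      simp only [Option.elim] at hfi
      simp only [pvGoA, hfi, if_pos rfl, List.foldl_cons, pvStep, hfc]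
      refine ih _ _ _ _ (by simp [hlen]) ?_ (fun x hx => hdom x (by simp [hx]))
      intro x hx
      by_cases hxc : x = c
      · subst hxc
        simp [List.getD, List.getElem?_set_self, hlen, hc]
      · have hne : x.toNat ≠ c.toNat := fun hh => hxc (Char.ext (UInt32.toNat_inj.mp hh))
        simp only [List.getD, List.getElem?_set_ne (Ne.symm hne)]
        have := hcorr x hx
        simp only [List.getD] at this
        simp [this, hxc]
    | some j =>
      rw [hfc] at hfi
      simp only [Option.elim] at hfi
      have hne : ¬ (((j : Nat) : Int) = -1) := by omega
      simp only [pvGoA, hfi, if_neg hne, List.foldl_cons, pvStep, hfc]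
      exact ih _ _ _ _ hlen hcorr (fun x hx => hdom x (by simp [hx]))

theorem pvFr_ne_none_of_mem {p : Char → Bool} {c : Char} : ∀ {l : List Char}, c ∈ l → p c = true → pvFr p l ≠ none := by
  intro l hm hp
  induction l with
  | nil => cases hm
  | cons a l ih =>
    by_cases ha : p a
    · simp [pvFr, ha]
    · have hac : c ≠ a := fun h => ha (h ▸ hp)
      have hm' : c ∈ l := by cases hm with | head => exact absurd rfl hac | tail _ h => exact h
      simp only [pvFr, ha, if_false]
      intro h
      exact ih hm' (by simpa using h)

-- the fold invariant: first-seen map is pvFr (· == c), res is the first index of a repeated char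
theorem pvFold_inv : ∀ (l : List Char),
    l.foldl pvStep (fun _ => none, none, 0) =
      (fun c => pvFr (fun x => x == c) l,
       (pvFr (fun c => decide (2 ≤ l.count c)) l).map (fun k => (k : Int)),
       l.length) := by
  intro l
  induction l using List.reverseRecOn with
  | nil => rfl
  | append_singleton l c ih =>
    rw [List.foldl_append, ih, List.foldl_cons, List.foldl_nil]
    cases hfc : pvFr (fun x => x == c) l with
    | none =>
      have hcl : c ∉ l := fun hm => pvFr_ne_none_of_mem hm (by simp) hfc
      have hcount0 : l.count c = 0 := List.count_eq_zero.mpr hcl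
      simp only [pvStep, hfc, Prod.mk.injEq]
      refine ⟨funext fun x => ?_, ?_, by simp⟩
      · rw [pvFr_append_singleton]
        by_cases hxc : x = c
        · subst hxc; simp [hfc]
        · have : (c == x) = false := by simp [Ne.symm hxc]
          cases hx : pvFr (fun y => y == x) l <;> simp [hx, this, hxc]
      · have hcongr : ∀ x ∈ l ++ [c],
            (decide (2 ≤ (l ++ [c]).count x)) = decide (2 ≤ l.count x) := by
          intro x hx
          by_cases hxc : x = c
          · subst hxc; simp [List.count_append, hcount0]
          · simp [List.count_append, List.count_singleton, Ne.symm hxc]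
        rw [pvFr_congr hcongr, pvFr_append_singleton]
        cases hres : pvFr (fun x => decide (2 ≤ l.count x)) l <;> simp [hcount0]
    | some j =>
      have hcl : c ∈ l := by
        by_contra h
        rw [pvFr_eq_none_of_not_mem h] at hfc
        cases hfc
      have hcount : 0 < l.count c := List.count_pos_iff.mpr hcl
      have hjlt : j < l.length := pvFr_some_lt hfc
      simp only [pvStep, hfc, Prod.mk.injEq]
      refine ⟨funext fun x => ?_, ?_, by simp⟩
      · rw [pvFr_append_singleton]
        cases hx : pvFr (fun y => y == x) l with
        | some k => rfl
        | none =>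
          have : x ≠ c := fun h => by rw [h, hfc] at hx; cases hx
          simp [Ne.symm this]
      · have hcongr : ∀ x ∈ l ++ [c],
            (decide (2 ≤ (l ++ [c]).count x)) = ((decide (2 ≤ l.count x)) || (x == c)) := by
          intro x hx
          by_cases hxc : x = c
          · subst hxc
            simp [List.count_append]
            omega
          · simp [List.count_append, List.count_singleton, Ne.symm hxc, hxc]
        rw [pvFr_congr hcongr, pvFr_or, pvFr_append_singleton, pvFr_append_singleton, hfc]
        cases hres : pvFr (fun x => decide (2 ≤ l.count x)) l with
        | some r => simp [pvOmin, Nat.cast_min]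
        | none =>
          by_cases hpc : (2 ≤ l.count c)
          · simp only [hpc, decide_true, if_true]
            simp [pvOmin, Nat.min_eq_right (Nat.le_of_lt hjlt)]
          · simp only [hpc, decide_false, Bool.false_eq_true, if_false]
            simp [pvOmin]

theorem pvGoB_eq (d : PySem.Dict Char Int) : ∀ (l : List Char) (i : Nat),
    pvGoB l i d = (match pvFr (fun c => decide (1 < d.getD c 0)) l with
      | none => -1
      | some k => ((i + k : Nat) : Int)) := by
  intro l
  induction l with
  | nil => intro i; simp [pvGoB, pvFr]
  | cons c rest ih =>
    intro i
    by_cases h : 1 < d.getD c 0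
    · simp [pvGoB, pvFr, h]
    · simp only [pvGoB, if_neg h, ih (i + 1), pvFr, h, decide_false, Bool.false_eq_true,
        if_false]
      cases hfr : pvFr (fun c => decide (1 < d.getD c 0)) rest with
      | none => simp
      | some k =>
        simp only [Option.map_some]
        congr 1
        omega

-- ===== VERDICT (by name: the statement is the Claim_ definition above) =====
theorem leftMostRepeatingChar_spec : Claim_equal_leftMostRepeatingChar := by
  intro s hdom
  unfold Spec_leftMostRepeatingChar leftMostRepeatingChar leftMostRepeatingChar_alt
  have hdm : ∀ c ∈ s.toList, c.toNat < 256 := by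
    intro c hc
    have h1 : pvDomChar c = true := by
      have := hdom
      unfold Dom_leftMostRepeatingChar pvDomStr at this
      rw [List.all_eq_true] at this
      exact this c hc
    unfold pvDomChar at h1
    simp at h1
    omega
  rw [pvGoA_eq s.toList (List.replicate 256 (-1)) (fun _ => none) none 0 (List.length_replicate) (fun c hc => by simp only [List.getD, List.getElem?_replicate, hc, if_true, Option.elim, Option.getD_some]) hdm]
  rw [pvFold_inv]
  rw [PySem.Dict.foldl_insert_getD_add_one_eq_counter]
  rw [pvGoB_eq]
  have hpred : (fun c => decide (1 < (PySem.Dict.counter s.toList).getD c 0)) =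
      (fun c => decide (2 ≤ s.toList.count c)) := by
    funext c
    rw [PySem.Dict.getD_counter, decide_eq_decide]
    omega
  rw [hpred]
  cases pvFr (fun c => decide (2 ≤ s.toList.count c)) s.toList <;> simp
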